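-- pv_equiv track=rewrite | github.com/yoobie-doo/jiifto | app.py | meter_sum
-- ===== SOURCE A (Python) =====
-- def meter_sum(line):
--     msum = 0
--     for syl in line:
--         if syl == 'S':
--             msum += 1
--         elif syl == 'L':
--             msum += 2
--     return msum
-- ===== SOURCE B (Python) =====
-- _WEIGHTS = {'S': 1, 'L': 2}
--
-- def meter_sum(line):
--     # Divide-and-conquer: the weight sum of line[lo:hi] is the sum of the
--     # weight sums of its two halves; a one-element segment is looked up in
--     # the _WEIGHTS table (0 for any other syllable).
--     def go(lo, hi):
--         if hi - lo <= 1: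
--             return _WEIGHTS.get(line[lo], 0) if hi - lo == 1 else 0
--         mid = (lo + hi) // 2
--         return go(lo, mid) + go(mid, hi)
--     return go(0, len(line))
-- ===== Notes on version B (the rewrite author's own statement) =====
-- stated objective: alternative
-- what changed: Replaces the linear accumulating loop with branch chain by a divide-and-conquer recursion that splits the line in half and adds the halves, resolving single syllables through a weight lookup table instead of if/elif branches.
import Mathlib
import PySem

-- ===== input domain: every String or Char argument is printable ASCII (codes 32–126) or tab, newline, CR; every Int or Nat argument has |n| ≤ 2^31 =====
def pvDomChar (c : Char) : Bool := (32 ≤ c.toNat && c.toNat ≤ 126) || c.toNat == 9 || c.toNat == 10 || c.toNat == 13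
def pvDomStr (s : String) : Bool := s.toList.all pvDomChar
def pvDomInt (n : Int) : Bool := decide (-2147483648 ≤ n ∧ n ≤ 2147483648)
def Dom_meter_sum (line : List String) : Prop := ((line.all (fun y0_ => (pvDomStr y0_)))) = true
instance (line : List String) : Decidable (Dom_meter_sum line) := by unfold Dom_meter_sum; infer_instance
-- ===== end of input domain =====

-- B replaces A's linear accumulating loop with if/elif branches by a divide-and-conquer
-- recursion over index halves, resolving single syllables through a weight lookup table
-- (objective: alternative; same asymptotic cost).

-- ===== PORT A =====
def meter_sum (line : List String) : Int :=
  line.foldl (fun msum syl =>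
    if syl == "S" then msum + 1
    else if syl == "L" then msum + 2
    else msum) 0

-- ===== PORT B =====
-- _WEIGHTS = {'S': 1, 'L': 2}
def msWeights : PySem.Dict String Int := PySem.Dict.ofList [("S", 1), ("L", 2)]

-- go(lo, hi) of Source B; line[lo] is in range whenever go is reached from meter_sum_alt,
-- so the total indexing form pyGetD is exact there.
def msGo (line : List String) (lo hi : Nat) : Int :=
  if hi - lo ≤ 1 then
    if hi - lo = 1 then msWeights.getD (PySem.List.pyGetD line (lo : Int) "") 0 else 0
  else
    msGo line lo ((lo + hi) / 2) + msGo line ((lo + hi) / 2) hi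
termination_by hi - lo
decreasing_by all_goals omega

def meter_sum_alt (line : List String) : Int := msGo line 0 line.length

-- ===== PRECONDITION & SPEC =====
def Spec_meter_sum (line : List String) (out : Int) : Prop := out = meter_sum_alt line
instance (line : List String) (out : Int) : Decidable (Spec_meter_sum line out) := by unfold Spec_meter_sum; infer_instance

-- ===== CLAIM (what is proved, stated in full; the proofs are below) =====
def Claim_equal_meter_sum : Prop := ∀ (line : List String), Dom_meter_sum line → Spec_meter_sum line (meter_sum line)

-- ===== LEMMAS AND PROOFS =====

-- the per-syllable weight (the value A's branch chain adds, and the table lookup B does)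
def msW (s : String) : Int := if s == "S" then 1 else if s == "L" then 2 else 0

lemma msWeights_getD (s : String) : msWeights.getD s 0 = msW s := by
  by_cases hS : s = "S"
  · subst hS; decide
  · by_cases hL : s = "L"
    · subst hL; decide
    · simp [msWeights, PySem.Dict.ofList, PySem.Dict.update, PySem.Dict.insert,
        PySem.Dict.getD, PySem.Dict.get?, PySem.Dict.contains, PySem.Dict.empty,
        msW, hS, hL, List.find?, Ne.symm hS]
      rw [show ("L" == s) = false from by simp [Ne.symm hL]]
      rfl

lemma meter_sum_shift (line : List String) (acc : Int) :
    acc + (line.map msW).sum =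
      line.foldl (fun msum syl =>
        if syl == "S" then msum + 1
        else if syl == "L" then msum + 2
        else msum) acc := by
  induction line generalizing acc with
  | nil => simp
  | cons h t ih =>
    simp only [List.map_cons, List.sum_cons, List.foldl_cons]
    rw [← ih]
    unfold msW
    split_ifs <;> ring

lemma msGo_eq_aux (line : List String) : ∀ (n lo hi : Nat), hi - lo ≤ n → lo ≤ hi →
    hi ≤ line.length →
    msGo line lo hi = (((line.drop lo).take (hi - lo)).map msW).sum := by
  intro n
  induction n with
  | zero =>
    intro lo hi hn h1 h2
    have heq : hi - lo = 0 := by omega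
    rw [msGo]
    simp [heq]
  | succ n ih =>
    intro lo hi hn h1 h2
    rw [msGo]
    by_cases hle : hi - lo ≤ 1
    · by_cases hone : hi - lo = 1
      · have hlt : lo < line.length := by omega
        rw [if_pos hle, if_pos hone, hone, List.drop_eq_getElem_cons hlt]
        simp only [List.take_succ_cons, List.take_zero, List.map_cons, List.map_nil,
          List.sum_cons, List.sum_nil, add_zero]
        rw [PySem.List.pyGetD_natCast, List.getD_eq_getElem?_getD,
          List.getElem?_eq_getElem hlt, msWeights_getD]
        rfl
      · have heq : hi - lo = 0 := by omega
        simp [heq]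
    · simp only [if_neg hle]
      have hmidlo : lo ≤ (lo + hi) / 2 := by omega
      have hmidhi : (lo + hi) / 2 ≤ hi := by omega
      rw [ih lo ((lo + hi) / 2) (by omega) hmidlo (by omega),
          ih ((lo + hi) / 2) hi (by omega) hmidhi h2]
      have hsplit : hi - lo = ((lo + hi) / 2 - lo) + (hi - (lo + hi) / 2) := by omega
      rw [hsplit, List.take_add, List.drop_drop]
      have hmid : lo + ((lo + hi) / 2 - lo) = (lo + hi) / 2 := by omega
      rw [hmid, List.map_append, List.sum_append]

lemma msGo_eq (line : List String) (lo hi : Nat) (h1 : lo ≤ hi) (h2 : hi ≤ line.length) :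
    msGo line lo hi = (((line.drop lo).take (hi - lo)).map msW).sum :=
  msGo_eq_aux line (hi - lo) lo hi le_rfl h1 h2

-- ===== VERDICT (by name: the statement is the Claim_ definition above) =====
theorem meter_sum_spec : Claim_equal_meter_sum := by
  intro line _
  unfold Spec_meter_sum meter_sum meter_sum_alt
  rw [msGo_eq line 0 line.length (Nat.zero_le _) le_rfl, ← meter_sum_shift line 0]
  simp
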